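-- pv_equiv track=rewrite | github.com/WwzFwz/finoss-cobol-intel | src/cobol_intel/outputs/html_report.py | _inline_code
-- ===== SOURCE A (Python) =====
-- def _inline_code(text: str) -> str:
--     """Convert backtick-wrapped text to <code> elements."""
--     parts = text.split("`")
--     result: list[str] = []
--     for i, part in enumerate(parts):
--         if i % 2 == 1:
--             result.append(f"<code>{part}</code>")
--         else:
--             result.append(part)
--     return "".join(result)
-- ===== SOURCE B (Python) =====
-- def _inline_code(text: str) -> str:
--     """Convert backtick-wrapped text to <code> elements (char-scanning state machine)."""
--     out: list[str] = []
--     in_code = False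
--     for ch in text:
--         if ch == "`":
--             out.append("</code>" if in_code else "<code>")
--             in_code = not in_code
--         else:
--             out.append(ch)
--     if in_code:
--         out.append("</code>")
--     return "".join(out)
-- ===== Notes on version B (the rewrite author's own statement) =====
-- stated objective: alternative
-- what changed: Replaces split-on-backtick plus parity-indexed wrapping of segments by a single character scan with an in_code toggle flag that emits <code>/</code> at each backtick and closes a dangling code span at end of string.
import Mathlib
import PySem

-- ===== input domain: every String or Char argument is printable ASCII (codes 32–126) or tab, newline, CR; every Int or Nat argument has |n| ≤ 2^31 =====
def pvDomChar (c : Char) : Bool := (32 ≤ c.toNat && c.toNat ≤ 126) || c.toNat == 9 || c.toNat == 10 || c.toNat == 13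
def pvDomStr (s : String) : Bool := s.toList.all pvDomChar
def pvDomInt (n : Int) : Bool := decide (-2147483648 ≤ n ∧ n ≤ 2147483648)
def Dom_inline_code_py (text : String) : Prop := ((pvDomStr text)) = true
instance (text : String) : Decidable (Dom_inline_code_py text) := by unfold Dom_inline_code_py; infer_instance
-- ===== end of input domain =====

-- B replaces A's split-on-backtick + parity-indexed wrapping by a single character scan
-- with an in_code toggle flag (alternative decomposition, same linear cost).

-- ===== PORT A =====
-- parts = text.split("`"); wrap the odd-indexed parts in <code>…</code>; "".join(result)
def inline_code_py (text : String) : String :=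
  let parts := PySem.Chars.splitOn text.toList "`".toList
  let result := (PySem.List.enumerate parts).foldl
    (fun (result : List (List Char)) ip =>
      if ip.1 % 2 == 1 then result ++ ["<code>".toList ++ ip.2 ++ "</code>".toList]
      else result ++ [ip.2]) []
  String.mk (PySem.Chars.join [] result)

-- ===== PORT B =====
-- scan characters with an in_code flag; emit <code>/</code> at each backtick; close at the end
def inline_code_py_alt (text : String) : String :=
  let st := text.toList.foldl
    (fun (st : List (List Char) × Bool) ch =>
      if ch = '`' then (st.1 ++ [if st.2 then "</code>".toList else "<code>".toList], !st.2)
      else (st.1 ++ [[ch]], st.2)) ([], false)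
  let out := if st.2 then st.1 ++ ["</code>".toList] else st.1
  String.mk (PySem.Chars.join [] out)

-- ===== PRECONDITION & SPEC =====
def Spec_inline_code_py (text : String) (out : String) : Prop := out = inline_code_py_alt text
instance (text : String) (out : String) : Decidable (Spec_inline_code_py text out) := by unfold Spec_inline_code_py; infer_instance

-- ===== CLAIM (what is proved, stated in full; the proofs are below) =====
def Claim_equal_inline_code_py : Prop := ∀ (text : String), Dom_inline_code_py text → Spec_inline_code_py text (inline_code_py text)

-- ===== LEMMAS AND PROOFS =====

/-- Simple recursion computing `text.split("`")` with accumulator `cur` (reversed current part). -/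
def splitCh : List Char → List Char → List (List Char)
  | [], cur => [cur.reverse]
  | c :: rest, cur => if c = '`' then cur.reverse :: splitCh rest [] else splitCh rest (c :: cur)

/-- The emitted chunks of B's state machine. -/
def mach : List Char → Bool → List (List Char)
  | [], _ => []
  | c :: rest, b =>
    if c = '`' then (if b then "</code>".toList else "<code>".toList) :: mach rest (!b)
    else [c] :: mach rest b

/-- The final flag of B's state machine. -/
def flagSM : List Char → Bool → Bool
  | [], b => b
  | c :: rest, b => if c = '`' then flagSM rest (!b) else flagSM rest b

/-- Parity-wrapped flattening of the parts list, parity carried as a Bool. -/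
def wrapB : List (List Char) → Bool → List Char
  | [], _ => []
  | p :: ps, b =>
    (if b then "<code>".toList ++ p ++ "</code>".toList else p) ++ wrapB ps (!b)

theorem go_eq (fuel : Nat) : ∀ (l cur : List Char) (acc : List (List Char)), l.length < fuel →
    PySem.Chars.splitOn.go ['`'] fuel l cur acc = acc.reverse ++ splitCh l cur := by
  induction fuel with
  | zero => intro l cur acc h; omega
  | succ f ih =>
    intro l cur acc h
    cases l with
    | nil => rw [PySem.Chars.splitOn.go] <;> simp [splitCh]
    | cons c rest =>
      rw [PySem.Chars.splitOn.go]
      by_cases hc : c = '`'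
      · subst hc
        rw [if_pos (by simp [List.isPrefixOf])]
        rw [ih _ [] (cur.reverse :: acc) (by simp at h ⊢; omega)]
        simp [splitCh]
      · rw [if_neg (by simp [List.isPrefixOf]; exact fun h => hc h.symm)]
        rw [ih rest (c :: cur) acc (by simp at h ⊢; omega)]
        simp [splitCh, hc]

theorem splitOn_eq (s : List Char) : PySem.Chars.splitOn s ['`'] = splitCh s [] := by
  unfold PySem.Chars.splitOn
  rw [go_eq (s.length + 1) s [] [] (by omega)]
  simp

theorem join_nil_flatten (xs : List (List Char)) : PySem.Chars.join [] xs = xs.flatten := by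
  induction xs with
  | nil => simp [PySem.Chars.join_nil]
  | cons a t ih =>
    cases t with
    | nil => simp [PySem.Chars.join_singleton]
    | cons b u => rw [PySem.Chars.join_cons_cons]; simp_all

theorem foldl_ifsnoc {a b : Type} (p : a → Bool) (f g : a → b) (l : List a) :
    ∀ init : List b,
      l.foldl (fun acc x => if p x then acc ++ [f x] else acc ++ [g x]) init
        = init ++ l.map (fun x => if p x then f x else g x) := by
  induction l with
  | nil => simp
  | cons c t ih =>
    intro init
    by_cases h : p c <;> simp [List.foldl_cons, h, ih]

theorem enum_wrap (ps : List (List Char)) : ∀ i : Int,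
    (List.map
      (fun ip : Int × List Char =>
        if ip.1 % 2 == 1 then "<code>".toList ++ ip.2 ++ "</code>".toList else ip.2) (PySem.List.enumerate ps i)).flatten
    = wrapB ps (decide (i % 2 = 1)) := by
  induction ps with
  | nil => intro i; simp [PySem.List.enumerate_nil, wrapB]
  | cons p t ih =>
    intro i
    rw [PySem.List.enumerate_cons, List.map_cons, List.flatten_cons, ih (i + 1)]
    have hpar : (decide ((i + 1) % 2 = 1)) = !(decide (i % 2 = 1)) := by
      by_cases h : i % 2 = 1 <;> simp [h] <;> omega
    rw [hpar]
    by_cases h : i % 2 = 1 <;> simp [wrapB, h]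

theorem foldl_mach (s : List Char) : ∀ (acc : List (List Char)) (b : Bool),
    s.foldl (fun (st : List (List Char) × Bool) ch =>
      if ch = '`' then (st.1 ++ [if st.2 then "</code>".toList else "<code>".toList], !st.2)
      else (st.1 ++ [[ch]], st.2)) (acc, b) = (acc ++ mach s b, flagSM s b) := by
  induction s with
  | nil => intro acc b; simp [mach, flagSM]
  | cons c rest ih =>
    intro acc b
    by_cases hc : c = '`'
    · subst hc
      rw [List.foldl_cons, if_pos rfl, ih]
      simp [mach, flagSM]
    · rw [List.foldl_cons, if_neg hc, ih]
      simp [mach, flagSM, hc]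

theorem wrapB_splitCh (s : List Char) : ∀ (pre : List Char) (b : Bool),
    wrapB (splitCh s pre) b =
      (if b then "<code>".toList else []) ++ pre.reverse ++ (mach s b).flatten
        ++ (if flagSM s b then "</code>".toList else []) := by
  induction s with
  | nil => intro pre b; cases b <;> simp [splitCh, wrapB, mach, flagSM]
  | cons c rest ih =>
    intro pre b
    by_cases hc : c = '`'
    · subst hc
      rw [show splitCh ('`' :: rest) pre = pre.reverse :: splitCh rest [] from by simp [splitCh]]
      rw [wrapB, ih [] (!b)]
      cases b <;> simp [mach, flagSM]
    · rw [show splitCh (c :: rest) pre = splitCh rest (c :: pre) from by simp [splitCh, hc]]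
      rw [ih (c :: pre) b]
      cases b <;> simp [mach, flagSM, hc]

-- ===== VERDICT (by name: the statement is the Claim_ definition above) =====
set_option maxHeartbeats 1000000 in
theorem inline_code_py_spec : Claim_equal_inline_code_py := by
  intro text _
  unfold Spec_inline_code_py inline_code_py inline_code_py_alt
  rw [foldl_mach]
  dsimp only
  congr 1
  rw [show ("`".toList : List Char) = ['`'] from rfl, splitOn_eq,
    foldl_ifsnoc (fun ip : Int × List Char => ip.1 % 2 == 1)
      (fun ip => "<code>".toList ++ ip.2 ++ "</code>".toList) (fun ip => ip.2)]
  rw [join_nil_flatten, List.nil_append]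
  rw [show (List.map (fun ip : Int × List Char =>
        if ip.1 % 2 == 1 then "<code>".toList ++ ip.2 ++ "</code>".toList else ip.2)
        (PySem.List.enumerate (splitCh text.toList []) 0)).flatten
      = wrapB (splitCh text.toList []) false from enum_wrap (splitCh text.toList []) 0]
  rw [wrapB_splitCh text.toList [] false]
  cases hfl : flagSM text.toList false <;> simp [join_nil_flatten]
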